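-- pv_equiv track=rewrite | github.com/SayakaMiura/BEAM | BEAMfast/Functions3.py | ExtractVarPos
-- ===== SOURCE A (Python) =====
-- def GetMutPos(Seq):
--    Len=len(Seq)
--    c=0
--    Ls=[]
--    while c<Len:
--       if Seq[c]=='T': Ls.append(c)
--       c+=1
--    return Ls
--
-- def ExtractVarPos(CloSeq):
--     MutP=[]
--     CloneC=0
--     for Clo in CloSeq:
--         MutP+=GetMutPos(CloSeq[Clo])
--         if CloSeq[Clo].find('T')!=-1: CloneC+=1
--     MutP=list(set(MutP))
--     MutP.sort()
--     print (MutP)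
--     NewSeqDic={}
--     for Seq in CloSeq:
--         NewSeq=''
--         for M in MutP:
--             NewSeq+=CloSeq[Seq][M]
--         NewSeqDic[Seq]=NewSeq
--     return MutP ,NewSeqDic
-- ===== SOURCE B (Python) =====
-- def ExtractVarPos(CloSeq):
--     vals = list(CloSeq.values())
--     maxLen = max((len(s) for s in vals), default=0)
--     MutP = [i for i in range(maxLen) if any(i < len(s) and s[i] == 'T' for s in vals)]
--     print(MutP)
--     NewSeqDic = {k: ''.join(s[M] for M in MutP) for k, s in CloSeq.items()}
--     return MutP, NewSeqDic
-- ===== Notes on version B (the rewrite author's own statement) =====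
-- stated objective: simpler
-- what changed: B replaces A's per-sequence T-position scan followed by list(set(...)) and a sort with one column-wise scan of range(max sequence length), which produces MutP already sorted and deduplicated.
import Mathlib
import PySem

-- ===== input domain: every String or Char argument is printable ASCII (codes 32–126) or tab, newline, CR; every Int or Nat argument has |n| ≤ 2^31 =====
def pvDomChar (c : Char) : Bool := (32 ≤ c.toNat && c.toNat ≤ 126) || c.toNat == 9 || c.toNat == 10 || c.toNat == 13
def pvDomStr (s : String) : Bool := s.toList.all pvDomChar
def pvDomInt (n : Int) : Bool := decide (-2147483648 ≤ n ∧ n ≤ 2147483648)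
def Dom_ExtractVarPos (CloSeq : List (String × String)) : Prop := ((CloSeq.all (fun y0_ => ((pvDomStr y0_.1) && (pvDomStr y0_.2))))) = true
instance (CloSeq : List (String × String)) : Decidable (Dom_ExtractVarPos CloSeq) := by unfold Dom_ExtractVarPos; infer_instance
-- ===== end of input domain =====

-- B replaces A's per-sequence position scan + set + sort by a single column-wise scan of
-- range(max length) that yields MutP already sorted and deduplicated (objective: simpler).
-- The equivalence is about the RETURN value only; A also prints MutP (B prints the same list).

-- ===== PORT A =====
-- while c<Len: if Seq[c]=='T': Ls.append(c); c+=1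
def GetMutPosGo : List Char → Int → List Int
  | [], _ => []
  | ch :: rest, c => (if ch = 'T' then [c] else []) ++ GetMutPosGo rest (c + 1)

def GetMutPosL (Seq : String) : List Int := GetMutPosGo Seq.toList 0

def ExtractVarPos (CloSeq : List (String × String)) : List Int × (List (String × String)) :=
  let d : PySem.Dict String String := PySem.Dict.mk CloSeq
  -- for Clo in CloSeq: MutP += GetMutPos(CloSeq[Clo]); CloneC is computed by A but unused
  let raw := CloSeq.foldl (fun acc p => acc ++ GetMutPosL (d.getD p.1 "")) []
  let _CloneC := CloSeq.foldl
    (fun c p => if PySem.Str.find (d.getD p.1 "") "T" ≠ -1 then c + 1 else c) (0 : Int)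
  -- MutP = list(set(MutP)); MutP.sort()
  let MutP := PySem.List.sorted (PySem.Set.ofList raw) (fun x => x) false
  -- NewSeq += CloSeq[Seq][M]  (the .getD ' ' default is unreachable under Pre_: an
  -- out-of-range M is Python's IndexError, excluded by Pre_ExtractVarPos)
  let nd := CloSeq.foldl
    (fun (nd : PySem.Dict String String) p =>
      nd.insert p.1 (String.mk
        (MutP.foldl (fun acc M => acc ++ [(PySem.Str.pyGet? (d.getD p.1 "") M).getD ' ']) [])))
    PySem.Dict.empty
  (MutP, nd.items)

-- ===== PORT B =====
def ExtractVarPos_alt (CloSeq : List (String × String)) : List Int × (List (String × String)) :=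
  let vals := CloSeq.map Prod.snd
  -- max((len(s) for s in vals), default=0), as the max-fold
  let maxLen : Int := vals.foldl (fun m s => max m (PySem.Str.len s)) 0
  let MutP := (PySem.List.pyRange 0 maxLen 1).filter
    (fun i => vals.any (fun s => decide (i < PySem.Str.len s) && (PySem.Str.pyGet? s i == some 'T')))
  -- {k: ''.join(s[M] for M in MutP) for k, s in CloSeq.items()}  (getD ' ' unreachable under Pre_)
  let nd := CloSeq.foldl
    (fun (nd : PySem.Dict String String) p =>
      nd.insert p.1 (String.mk (MutP.map (fun M => (PySem.Str.pyGet? p.2 M).getD ' ')))) 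
    PySem.Dict.empty
  (MutP, nd.items)

-- ===== PRECONDITION & SPEC =====
-- Pre_ excludes (a) association lists with duplicate keys — A receives a Python dict, where
-- duplicates collapse to the last value before A ever runs, so the assoc-list behaviour is
-- accidental — and (b) inputs where some sequence is shorter than a selected T-position,
-- on which A raises IndexError in its extraction loop (and B raises likewise).
def Pre_ExtractVarPos (CloSeq : List (String × String)) : Prop :=
  (CloSeq.map Prod.fst).Nodup ∧
  ∀ p ∈ CloSeq, ∀ q ∈ CloSeq, ∀ i ∈ List.range q.2.toList.length,
    q.2.toList.getD i ' ' = 'T' → i < p.2.toList.length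
instance (CloSeq : List (String × String)) : Decidable (Pre_ExtractVarPos CloSeq) := by
  unfold Pre_ExtractVarPos; infer_instance

def pvWitness_ExtractVarPos : (List (String × String)) := [("a", "AT"), ("b", "TG")]

def Spec_ExtractVarPos (CloSeq : List (String × String)) (out : List Int × (List (String × String))) : Prop := out = ExtractVarPos_alt CloSeq
instance (CloSeq : List (String × String)) (out : List Int × (List (String × String))) : Decidable (Spec_ExtractVarPos CloSeq out) := by unfold Spec_ExtractVarPos; infer_instance

-- ===== CLAIM (what is proved, stated in full; the proofs are below) =====
def Claim_equal_ExtractVarPos : Prop := ∀ (CloSeq : List (String × String)), Dom_ExtractVarPos CloSeq → Pre_ExtractVarPos CloSeq → Spec_ExtractVarPos CloSeq (ExtractVarPos CloSeq)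

-- ===== LEMMAS AND PROOFS =====

-- with unique keys, A's lookup of a key returns that pair's value
theorem lookup_eq_snd {CloSeq : List (String × String)} {p : String × String}
    (hnd : (CloSeq.map Prod.fst).Nodup) (hp : p ∈ CloSeq) :
    (PySem.Dict.mk CloSeq).getD p.1 "" = p.2 := by
  apply PySem.Dict.getD_of_mem_items (d := PySem.Dict.mk CloSeq) (k := p.1) (v := p.2)
  · simpa using hp
  · simpa using hnd

theorem mem_GetMutPosGo (l : List Char) (c x : Int) :
    x ∈ GetMutPosGo l c ↔ ∃ n : Nat, n < l.length ∧ l.getD n ' ' = 'T' ∧ x = c + n := by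
  induction l generalizing c with
  | nil => simp [GetMutPosGo]
  | cons ch rest ih =>
    simp only [GetMutPosGo, List.mem_append, ih]
    constructor
    · rintro (hx | ⟨n, hn, hT, rfl⟩)
      · split_ifs at hx with hT
        · simp only [List.mem_singleton] at hx
          exact ⟨0, by simp, by simpa using hT, by simpa using hx⟩
        · simp at hx
      · exact ⟨n + 1, by simpa using hn, by simpa using hT, by push_cast; ring⟩
    · rintro ⟨n, hn, hT, rfl⟩
      cases n with
      | zero =>
        left
        simp only [List.getD_cons_zero] at hT
        simp [hT]
      | succ m =>
        right
        exact ⟨m, by simpa using hn, by simpa using hT, by push_cast; ring⟩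

theorem init_le_foldl_max_len (l : List String) (init : Int) :
    init ≤ l.foldl (fun m t => max m (PySem.Str.len t)) init := by
  induction l generalizing init with
  | nil => simp
  | cons a t ih => exact le_trans (le_max_left _ _) (ih (max init (PySem.Str.len a)))

theorem le_foldl_max_len (l : List String) (init : Int) {s : String} (hs : s ∈ l) :
    PySem.Str.len s ≤ l.foldl (fun m t => max m (PySem.Str.len t)) init := by
  induction l generalizing init with
  | nil => simp at hs
  | cons a t ih =>
    rw [List.foldl_cons]
    cases hs with
    | head => exact le_trans (le_max_right init _) (init_le_foldl_max_len t _)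
    | tail _ hs => exact ih _ hs

theorem mutp_eq (CloSeq : List (String × String))
    (hnd : (CloSeq.map Prod.fst).Nodup) :
    PySem.List.sorted
      (PySem.Set.ofList (CloSeq.foldl
        (fun acc p => acc ++ GetMutPosL ((PySem.Dict.mk CloSeq).getD p.1 "")) []))
      (fun x => x) false
    = (PySem.List.pyRange 0 ((CloSeq.map Prod.snd).foldl (fun m s => max m (PySem.Str.len s)) 0) 1).filter
        (fun i => (CloSeq.map Prod.snd).any
          (fun s => decide (i < PySem.Str.len s) && (PySem.Str.pyGet? s i == some 'T'))) := by
  apply PySem.List.sorted_eq_of_perm_of_pairwise_lt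
  · rw [List.perm_ext_iff_of_nodup
      ((PySem.List.nodup_pyRange_one _ _).filter _) (PySem.Set.nodup_ofList _)]
    intro x
    rw [PySem.Set.mem_ofList, PySem.List.foldl_append_eq_flatMap]
    simp only [List.nil_append, List.mem_flatMap, List.mem_filter, PySem.List.mem_pyRange_one,
      List.any_eq_true, List.mem_map, GetMutPosL, mem_GetMutPosGo, Bool.and_eq_true,
      decide_eq_true_eq, beq_iff_eq, PySem.Str.len_eq]
    constructor
    · rintro ⟨⟨hx0, _hxm⟩, s, ⟨p, hp, rfl⟩, hxl, hT⟩
      refine ⟨p, hp, ?_⟩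
      rw [lookup_eq_snd hnd hp]
      rw [show x = ((x.toNat : Nat) : Int) by omega, PySem.Str.pyGet?_natCast] at hT
      refine ⟨x.toNat, by omega, ?_, by omega⟩
      simp [List.getD_eq_getElem?_getD, hT]
    · rintro ⟨p, hp, n, hn, hT, rfl⟩
      rw [lookup_eq_snd hnd hp] at hn hT
      have hle := le_foldl_max_len (CloSeq.map Prod.snd) 0 (List.mem_map_of_mem hp)
      simp only [PySem.Str.len_eq] at hle
      refine ⟨⟨by omega, by omega⟩, p.2, ⟨p, hp, rfl⟩, by omega, ?_⟩
      have h0 : (0 : Int) + n = (n : Int) := by omega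
      rw [h0, PySem.Str.pyGet?_natCast, List.getElem?_eq_getElem hn]
      rw [List.getD_eq_getElem _ _ hn] at hT
      simp [hT]
  · exact List.Pairwise.filter _ (PySem.List.pairwise_lt_pyRange_one 0 _)

-- ===== VERDICT (by name: the statement is the Claim_ definition above) =====
theorem ExtractVarPos_spec : Claim_equal_ExtractVarPos := by
  intro CloSeq _hdom hpre
  obtain ⟨hnd, _hlen⟩ := hpre
  unfold Spec_ExtractVarPos
  simp only [ExtractVarPos, ExtractVarPos_alt]
  rw [mutp_eq CloSeq hnd]
  congr 1
  congr 1
  apply PySem.List.foldl_congr_mem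
  intro acc p hp
  rw [lookup_eq_snd hnd hp, PySem.List.foldl_append_singleton_eq_map, List.nil_append]
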